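-- pv_equiv track=rewrite | github.com/mucsci-students/2023sp-420-G-J-IFY | src/spelling_bee/MakePuzzle.py | isProperBaseWord
-- ===== SOURCE A (Python) =====
-- def isProperBaseWord(pangram):
--     alphabet = ['a','b','c','d','e','f','g','h','i','j','k','l','m','n','o','p','q','r','s','t','u','v','w','x','y','z']
--
--     if len(pangram) < 7:
--         raise ValueError("Pangrams must 7 letters or more")
--
--     # Checking for anything that is not a letter
--     if not pangram.isalpha():
--         raise ValueError("Pangrams can only contain letters")
--
--     # Puts each unique letter in a list
--     uniqueLetters = [i for i in alphabet if i in pangram]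
--
--     if len(uniqueLetters) < 7:
--         raise ValueError("Pangrams contain 7 unique letters")
--
--     return True
-- ===== SOURCE B (Python) =====
-- def isProperBaseWord(pangram):
--     if len(pangram) < 7:
--         raise ValueError("Pangrams must 7 letters or more")
--
--     # Checking for anything that is not a letter
--     if not pangram.isalpha():
--         raise ValueError("Pangrams can only contain letters")
--
--     # Single pass, 26-bit mask: bit (ord(ch)-97) marks a lowercase a-z letter seen
--     mask = 0
--     for ch in pangram:
--         o = ord(ch)
--         if 97 <= o <= 122:
--             mask |= 1 << (o - 97)
--
--     if bin(mask).count('1') < 7: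
--         raise ValueError("Pangrams contain 7 unique letters")
--
--     return True
-- ===== Notes on version B (the rewrite author's own statement) =====
-- stated objective: alternative
-- what changed: Instead of scanning the 26-letter alphabet and testing each letter's membership in the pangram, B makes a single pass over the pangram accumulating a 26-bit integer mask of seen lowercase letters and then counts the set bits (popcount).
import Mathlib
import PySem

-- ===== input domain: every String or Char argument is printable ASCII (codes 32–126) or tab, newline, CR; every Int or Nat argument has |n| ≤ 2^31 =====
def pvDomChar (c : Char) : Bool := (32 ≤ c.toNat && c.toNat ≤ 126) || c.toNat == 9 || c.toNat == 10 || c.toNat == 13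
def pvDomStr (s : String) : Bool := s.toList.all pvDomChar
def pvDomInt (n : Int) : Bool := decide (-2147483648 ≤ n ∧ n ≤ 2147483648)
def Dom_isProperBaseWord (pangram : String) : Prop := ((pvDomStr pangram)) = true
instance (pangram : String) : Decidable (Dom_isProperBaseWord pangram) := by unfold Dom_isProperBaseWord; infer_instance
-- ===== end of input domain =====

-- B replaces A's 26-iteration alphabet scan (membership test in pangram per letter) by a single
-- pass over the pangram maintaining a 26-bit mask of seen lowercase letters, then a popcount;
-- same guards, same result.


-- ===== PORT A =====
def pvAlphabet : List Char :=
  ['a','b','c','d','e','f','g','h','i','j','k','l','m','n','o','p','q','r','s','t','u','v','w','x','y','z']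

-- raise paths return false; they lie outside Pre_isProperBaseWord
def isProperBaseWord (pangram : String) : Bool :=
  if pangram.toList.length < 7 then false
  else if !(PySem.Str.strIsalpha pangram) then false
  else
    let uniqueLetters := pvAlphabet.filter (fun i => pangram.toList.contains i)
    if uniqueLetters.length < 7 then false
    else true

-- ===== PORT B =====
-- is ch a lowercase a-z letter (97 <= ord(ch) <= 122)
def pvLower (c : Char) : Bool := 97 ≤ c.toNat && c.toNat ≤ 122

-- the loop: mask |= 1 << (ord(ch) - 97) for lowercase ch
def pvMask (cs : List Char) : Nat :=
  cs.foldl (fun m c => if pvLower c then m ||| (1 <<< (c.toNat - 97)) else m) 0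

-- hand port of bin(mask).count('1'): count 1-bits by repeated division
def pvPopcount (m : Nat) : Nat :=
  if m = 0 then 0 else m % 2 + pvPopcount (m / 2)
decreasing_by exact Nat.div_lt_self (Nat.pos_of_ne_zero (by assumption)) (by decide)

def isProperBaseWord_alt (pangram : String) : Bool :=
  if pangram.toList.length < 7 then false
  else if !(PySem.Str.strIsalpha pangram) then false
  else
    let mask := pvMask pangram.toList
    if pvPopcount mask < 7 then false
    else true

-- ===== PRECONDITION & SPEC =====
-- Pre_ excludes exactly the inputs on which A raises ValueError: too short, a non-letter
-- character, or fewer than 7 distinct a-z letters.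
def Pre_isProperBaseWord (pangram : String) : Prop :=
  7 ≤ pangram.toList.length ∧ PySem.Str.strIsalpha pangram = true ∧
  7 ≤ ((PySem.List.dedup pangram.toList).filter (fun c => pvAlphabet.contains c)).length
instance (pangram : String) : Decidable (Pre_isProperBaseWord pangram) := by
  unfold Pre_isProperBaseWord; infer_instance
def pvWitness_isProperBaseWord : String := "abcdefg"

def Spec_isProperBaseWord (pangram : String) (out : Bool) : Prop := out = isProperBaseWord_alt pangram
instance (pangram : String) (out : Bool) : Decidable (Spec_isProperBaseWord pangram out) := by
  unfold Spec_isProperBaseWord; infer_instance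

-- ===== CLAIM (what is proved, stated in full; the proofs are below) =====
def Claim_equal_isProperBaseWord : Prop := ∀ (pangram : String), Dom_isProperBaseWord pangram → Pre_isProperBaseWord pangram → Spec_isProperBaseWord pangram (isProperBaseWord pangram)

-- ===== LEMMAS AND PROOFS =====

-- bit j of the folded mask is set iff some character of cs is the lowercase letter 97+j
theorem pv_testBit_mask_fold (cs : List Char) (m : Nat) (j : Nat) :
    Nat.testBit (cs.foldl (fun m c => if pvLower c then m ||| (1 <<< (c.toNat - 97)) else m) m) j
      = (Nat.testBit m j || cs.any (fun c => pvLower c && (c.toNat - 97 == j))) := by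
  induction cs generalizing m with
  | nil => simp
  | cons c cs ih =>
    simp only [List.foldl_cons, List.any_cons, ih]
    by_cases h : pvLower c = true
    · simp only [h, if_true, Nat.shiftLeft_eq, one_mul, Nat.testBit_or, Nat.testBit_two_pow,
        Bool.or_assoc]
      by_cases hcj : c.toNat - 97 = j
      · simp [hcj]
      · have hb : (c.toNat - 97 == j) = false := by simpa using hcj
        simp [hb, hcj]
    · simp [h]

theorem pv_mask_lt (cs : List Char) : pvMask cs < 2 ^ 26 := by
  unfold pvMask
  suffices h : ∀ m, m < 2 ^ 26 →
      cs.foldl (fun m c => if pvLower c then m ||| (1 <<< (c.toNat - 97)) else m) m < 2 ^ 26 from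
    h 0 (by decide)
  induction cs with
  | nil => intro m hm; simpa using hm
  | cons c cs ih =>
    intro m hm
    simp only [List.foldl_cons]
    apply ih
    by_cases h : pvLower c = true
    · simp only [h, if_true]
      apply Nat.or_lt_two_pow hm
      have hle : c.toNat - 97 ≤ 25 := by
        have := h; unfold pvLower at this
        simp only [Bool.and_eq_true, decide_eq_true_eq] at this
        omega
      calc 1 <<< (c.toNat - 97) = 2 ^ (c.toNat - 97) := by
            simp [Nat.shiftLeft_eq]
        _ ≤ 2 ^ 25 := Nat.pow_le_pow_right (by decide) hle
        _ < 2 ^ 26 := by decide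
    · simpa [h] using hm

theorem pv_popcount_unfold (m : Nat) : pvPopcount m = m % 2 + pvPopcount (m / 2) := by
  rw [pvPopcount]
  by_cases h : m = 0
  · simp [h, pvPopcount]
  · simp [h]

-- popcount counts the set bits below any bound covering m
theorem pv_popcount_eq_countP (n : Nat) : ∀ m, m < 2 ^ n →
    pvPopcount m = (List.range n).countP (fun j => Nat.testBit m j) := by
  induction n with
  | zero =>
    intro m hm
    interval_cases m
    simp [pvPopcount]
  | succ n ih =>
    intro m hm
    have hdiv : m / 2 < 2 ^ n := by
      rw [pow_succ] at hm; omega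
    rw [pv_popcount_unfold, ih (m / 2) hdiv, List.range_succ_eq_map]
    simp only [List.countP_cons, List.countP_map]
    have hfun : ((fun j => Nat.testBit m j) ∘ Nat.succ) = (fun j => Nat.testBit (m / 2) j) := by
      funext j
      simp only [Function.comp_apply, Nat.succ_eq_add_one]
      exact Nat.testBit_add_one m j
    rw [hfun]
    have h0 : (Nat.testBit m 0) = (m % 2 == 1) := by
      simp [Nat.testBit, Nat.shiftRight_zero]
    have h2 : m % 2 = 0 ∨ m % 2 = 1 := by omega
    rcases h2 with h | h
    · simp [h0, h]
    · simp [h0, h]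
      omega

-- the alphabet as an indexed range
theorem pv_alphabet_eq_map : pvAlphabet = (List.range 26).map (fun j => Char.ofNat (97 + j)) := by
  decide

theorem pv_contains_iff (cs : List Char) (j : Nat) (hj : j < 26) :
    cs.contains (Char.ofNat (97 + j)) = cs.any (fun c => pvLower c && (c.toNat - 97 == j)) := by
  have hval : (Char.ofNat (97 + j)).toNat = 97 + j := by
    interval_cases j <;> decide
  have hfun : (fun c => Char.ofNat (97 + j) == c)
      = (fun c => pvLower c && (c.toNat - 97 == j)) := by
    funext c
    have hbeq : (Char.ofNat (97 + j) == c) = decide (c.toNat = 97 + j) := by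
      cases h : Char.ofNat (97 + j) == c
      · simp only [beq_eq_false_iff_ne, ne_eq] at h
        symm; simp only [decide_eq_false_iff_not]
        intro hc; apply h; apply Char.ext; symm
        have : c.toNat = (Char.ofNat (97 + j)).toNat := by rw [hval]; exact hc
        exact UInt32.toNat_inj.mp this
      · simp only [beq_iff_eq] at h
        subst h; simp [hval]
    rw [hbeq]
    unfold pvLower
    by_cases hc : c.toNat = 97 + j <;> simp [hc] <;> omega
  rw [List.contains_eq_any_beq, hfun]

-- A's count of present alphabet letters equals B's popcount of the mask
theorem pv_counts_eq (cs : List Char) :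
    (pvAlphabet.filter (fun i => cs.contains i)).length = pvPopcount (pvMask cs) := by
  rw [pv_popcount_eq_countP 26 (pvMask cs) (pv_mask_lt cs), pv_alphabet_eq_map,
    (Eq.symm List.countP_eq_length_filter :
      (List.filter _ _).length = List.countP _ _), List.countP_map]
  apply List.countP_congr
  intro j hj
  simp only [List.mem_range] at hj
  have hb : Nat.testBit (pvMask cs) j
      = cs.any (fun c => pvLower c && (c.toNat - 97 == j)) := by
    unfold pvMask
    rw [pv_testBit_mask_fold]
    simp
  simp only [Function.comp, hb]
  rw [pv_contains_iff cs j hj]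

-- ===== VERDICT (by name: the statement is the Claim_ definition above) =====
theorem isProperBaseWord_spec : Claim_equal_isProperBaseWord := by
  intro pangram _ _
  unfold Spec_isProperBaseWord isProperBaseWord isProperBaseWord_alt
  simp only [pv_counts_eq]
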